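-- pv_equiv track=rewrite | github.com/pxxgogo/misscut_dep_test | kernel/model/prob_model/prob_model.py | b_2_i_redis
-- ===== SOURCE A (Python) =====
-- def b_2_i_redis(bytes):
--     index = len(bytes) - 1
--     seed = 1
--     ret = 0
--     while index >= 0:
--         ret += seed * (bytes[index] - 48)
--         seed *= 10
--         index -= 1
--     return ret
-- ===== SOURCE B (Python) =====
-- def b_2_i_redis(bytes):
--     ret = 0
--     for b in bytes:
--         ret = ret * 10 + (b - 48)
--     return ret
-- ===== Notes on version B (the rewrite author's own statement) =====
-- stated objective: idiomatic
-- what changed: Replaces the right-to-left pass that maintains an explicit power-of-ten 'seed' with a left-to-right Horner fold carrying a single accumulator.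
import Mathlib
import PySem

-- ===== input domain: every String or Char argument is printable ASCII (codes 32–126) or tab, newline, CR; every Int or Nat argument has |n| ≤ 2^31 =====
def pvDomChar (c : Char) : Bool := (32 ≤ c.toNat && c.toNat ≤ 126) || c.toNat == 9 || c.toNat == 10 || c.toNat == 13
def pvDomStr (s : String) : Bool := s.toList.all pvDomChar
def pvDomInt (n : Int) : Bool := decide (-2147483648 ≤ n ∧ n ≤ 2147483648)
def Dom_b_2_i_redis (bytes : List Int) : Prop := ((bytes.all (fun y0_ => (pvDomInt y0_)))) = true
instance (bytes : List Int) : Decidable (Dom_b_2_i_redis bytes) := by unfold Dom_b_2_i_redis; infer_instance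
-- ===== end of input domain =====

-- B replaces A's right-to-left pass with its power-of-ten seed by a left-to-right Horner fold (idiomatic; same cost).
-- ===== PORT A =====
-- A's while loop: index runs len-1 .. 0; ported as recursion on the count k = index+1 of remaining iterations.
def b_2_i_redis_loop (bytes : List Int) : Nat → Int → Int → Int
  | 0, _, ret => ret
  | k+1, seed, ret =>
      b_2_i_redis_loop bytes k (seed * 10) (ret + seed * ((PySem.List.pyGet? bytes (k : Int)).getD 0 - 48))

def b_2_i_redis (bytes : List Int) : Int :=
  b_2_i_redis_loop bytes bytes.length 1 0

-- ===== PORT B =====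
def b_2_i_redis_alt (bytes : List Int) : Int :=
  bytes.foldl (fun ret b => ret * 10 + (b - 48)) 0

-- ===== PRECONDITION & SPEC =====
def Spec_b_2_i_redis (bytes : List Int) (out : Int) : Prop := out = b_2_i_redis_alt bytes
instance (bytes : List Int) (out : Int) : Decidable (Spec_b_2_i_redis bytes out) := by unfold Spec_b_2_i_redis; infer_instance

-- ===== CLAIM (what is proved, stated in full; the proofs are below) =====
def Claim_equal_b_2_i_redis : Prop := ∀ (bytes : List Int), Dom_b_2_i_redis bytes → Spec_b_2_i_redis bytes (b_2_i_redis bytes)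

-- ===== LEMMAS AND PROOFS =====

-- ===== VERDICT (by name: the statement is the Claim_ definition above) =====
-- loop invariant: k iterations of A's loop add seed * Horner(first k bytes) to ret
theorem b_2_i_redis_loop_eq (bytes : List Int) (k : Nat) (hk : k ≤ bytes.length)
    (seed ret : Int) :
    b_2_i_redis_loop bytes k seed ret
      = ret + seed * (bytes.take k).foldl (fun r b => r * 10 + (b - 48)) 0 := by
  induction k generalizing seed ret with
  | zero => simp [b_2_i_redis_loop]
  | succ k ih =>
    have hklt : k < bytes.length := hk
    rw [b_2_i_redis_loop, ih (Nat.le_of_lt hklt),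
        List.take_succ, PySem.List.pyGet?_ofNat bytes k hklt,
        List.getElem?_eq_getElem hklt, Option.toList_some, List.foldl_append,
        Option.getD_some]
    simp only [List.foldl_cons, List.foldl_nil]
    ring

theorem b_2_i_redis_spec : Claim_equal_b_2_i_redis := by
  intro bytes _
  unfold Spec_b_2_i_redis b_2_i_redis b_2_i_redis_alt
  rw [b_2_i_redis_loop_eq bytes bytes.length le_rfl]
  simp
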